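-- pv_equiv track=rewrite | github.com/ArielM24/kmeans | kmeans.py | get_cluster_numbers
-- ===== SOURCE A (Python) =====
-- def get_cluster_numbers(centroids, tags):
-- 	clusters = []
-- 	for i in range(len(centroids)):
-- 		numbers = {}
-- 		for tag in tags:
-- 			numbers[tag] = 0
-- 		clusters.append(numbers)
--
-- 	for i in range(len(centroids)):
-- 		for value in centroids[i]:
-- 			clusters[i][tags[value]] = clusters[i][tags[value]] + 1
--
-- 	return clusters
-- ===== SOURCE B (Python) =====
-- def get_cluster_numbers(centroids, tags):
-- 	return [{t: sum(1 for v in centroid if tags[v] == t) for t in tags}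
-- 	        for centroid in centroids]
-- ===== Notes on version B (the rewrite author's own statement) =====
-- stated objective: simpler
-- what changed: Replaces A's zero-initialize-all-dicts-then-increment-per-value dict mutation with a per-tag counting comprehension: for each centroid and each tag the matching mapped values are counted directly by a scan, so there are no mutable counters and no increment phase (trades O(c*(t+m)) for O(c*t*m)).
import Mathlib
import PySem

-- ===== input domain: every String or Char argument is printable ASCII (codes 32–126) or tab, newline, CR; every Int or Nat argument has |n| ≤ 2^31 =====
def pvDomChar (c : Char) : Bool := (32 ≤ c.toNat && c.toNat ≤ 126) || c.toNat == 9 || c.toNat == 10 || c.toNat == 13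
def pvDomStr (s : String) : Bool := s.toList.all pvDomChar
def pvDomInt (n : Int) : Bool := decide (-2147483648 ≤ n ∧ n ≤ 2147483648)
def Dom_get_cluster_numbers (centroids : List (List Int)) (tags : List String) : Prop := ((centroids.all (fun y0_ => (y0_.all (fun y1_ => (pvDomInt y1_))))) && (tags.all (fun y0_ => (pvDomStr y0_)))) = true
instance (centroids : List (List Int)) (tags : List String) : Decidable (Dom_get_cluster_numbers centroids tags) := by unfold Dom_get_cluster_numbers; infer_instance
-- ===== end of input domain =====

-- B replaces A's zero-initialize-then-increment-per-value dict mutation by a per-tag counting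
-- comprehension (for each tag, scan the centroid and count matches; no mutable counters): simpler, same results.

-- ===== PORT A =====
def get_cluster_numbers (centroids : List (List Int)) (tags : List String) : List (List (String × Int)) :=
  -- first loop: clusters = one all-zero dict per centroid
  let clusters : List (PySem.Dict String Int) :=
    (PySem.List.pyRange 0 centroids.length).foldl
      (fun cl _i => cl ++ [tags.foldl (fun d tag => d.insert tag (0 : Int)) PySem.Dict.empty]) []
  -- second loop: clusters[i][tags[value]] = clusters[i][tags[value]] + 1
  -- (Python mutates the dict object clusters[i] in place; modelled as read-modify-write at index i)
  let clusters :=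
    (PySem.List.pyRange 0 centroids.length).foldl
      (fun cl i =>
        PySem.List.pySetD cl i
          ((PySem.List.pyGetD centroids i []).foldl
            (fun d v =>
              match PySem.List.pyGet? tags v with
              | some t =>
                (match d.get? t with
                 | some cnt => d.insert t (cnt + 1)
                 | none => d)        -- Python: KeyError (unreachable: the key is in tags, all pre-inserted)
              | none => d)           -- Python: IndexError; excluded by Pre_
            (PySem.List.pyGetD cl i PySem.Dict.empty)))
      clusters
  clusters.map (·.items)

-- ===== PORT B =====
-- sum(1 for v in centroid if tags[v] == t)
def pvCountTag (tags : List String) (centroid : List Int) (t : String) : Int :=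
  centroid.foldl
    (fun s v =>
      match PySem.List.pyGet? tags v with
      | some u => if u = t then s + 1 else s
      | none => s)                   -- Python: IndexError; excluded by Pre_
    0

def get_cluster_numbers_alt (centroids : List (List Int)) (tags : List String) : List (List (String × Int)) :=
  centroids.map (fun centroid =>
    (tags.foldl (fun d t => d.insert t (pvCountTag tags centroid t)) PySem.Dict.empty).items)

-- ===== PRECONDITION & SPEC =====
-- Pre_ excludes exactly the inputs where Python A raises IndexError: a centroid value v with
-- tags[v] out of range (v < -len(tags) or v >= len(tags)).
def Pre_get_cluster_numbers (centroids : List (List Int)) (tags : List String) : Prop :=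
  ∀ c ∈ centroids, ∀ v ∈ c, PySem.Raise.InRange tags.length v
instance (centroids : List (List Int)) (tags : List String) : Decidable (Pre_get_cluster_numbers centroids tags) := by unfold Pre_get_cluster_numbers; infer_instance

def pvWitness_get_cluster_numbers : List (List Int) × List String := ([[0, 1, 0], [-1]], ["x", "y"])

def Spec_get_cluster_numbers (centroids : List (List Int)) (tags : List String) (out : List (List (String × Int))) : Prop := out = get_cluster_numbers_alt centroids tags
instance (centroids : List (List Int)) (tags : List String) (out : List (List (String × Int))) : Decidable (Spec_get_cluster_numbers centroids tags out) := by unfold Spec_get_cluster_numbers; infer_instance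

-- ===== CLAIM (what is proved, stated in full; the proofs are below) =====
def Claim_equal_get_cluster_numbers : Prop := ∀ (centroids : List (List Int)) (tags : List String), Dom_get_cluster_numbers centroids tags → Pre_get_cluster_numbers centroids tags → Spec_get_cluster_numbers centroids tags (get_cluster_numbers centroids tags)

-- ===== LEMMAS AND PROOFS =====

-- the tag a value maps to (total form of tags[v], used only under Pre_)
def pvTagOf (tags : List String) (v : Int) : String := (PySem.List.pyGet? tags v).getD ""

-- A's per-centroid increment loop, the literal step function
def pvStepA (tags : List String) (d : PySem.Dict String Int) (v : Int) : PySem.Dict String Int :=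
  match PySem.List.pyGet? tags v with
  | some t =>
    (match d.get? t with
     | some cnt => d.insert t (cnt + 1)
     | none => d)
  | none => d

-- the all-zero start dict of A
def pvD0 (tags : List String) : PySem.Dict String Int :=
  tags.foldl (fun d tag => d.insert tag (0 : Int)) PySem.Dict.empty

theorem pv_exists_tag (tags : List String) {v : Int}
    (hv : PySem.Raise.InRange tags.length v) :
    ∃ t, PySem.List.pyGet? tags v = some t := by
  cases hg : PySem.List.pyGet? tags v with
  | none => exact absurd ((PySem.List.pyGet?_eq_none_iff tags v).mp hg) (not_not_intro hv)
  | some t => exact ⟨t, rfl⟩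

-- A's increment loop over the values, rewritten as a loop over the mapped tags
theorem pv_foldA_eq_tags (tags : List String) (c : List Int)
    (h : ∀ v ∈ c, PySem.Raise.InRange tags.length v) (d : PySem.Dict String Int) :
    c.foldl (pvStepA tags) d
    = (c.map (pvTagOf tags)).foldl
        (fun d t => match d.get? t with
          | some cnt => d.insert t (cnt + 1)
          | none => d) d := by
  induction c generalizing d with
  | nil => rfl
  | cons v c ih =>
    obtain ⟨t, ht⟩ := pv_exists_tag tags (h v (by simp))
    simp only [List.foldl_cons, List.map_cons, pvStepA, pvTagOf, ht, Option.getD_some]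
    exact ih (fun w hw => h w (by simp [hw])) _

-- B's per-tag counting scan, rewritten as a count over the mapped tags
theorem pv_count_eq_tags (tags : List String) (c : List Int)
    (h : ∀ v ∈ c, PySem.Raise.InRange tags.length v) (t : String) (s : Int) :
    c.foldl
      (fun s v =>
        match PySem.List.pyGet? tags v with
        | some u => if u = t then s + 1 else s
        | none => s) s
    = s + ((c.map (pvTagOf tags)).count t : Int) := by
  induction c generalizing s with
  | nil => simp
  | cons v c ih =>
    obtain ⟨u, hu⟩ := pv_exists_tag tags (h v (by simp))
    have ih' := ih (fun w hw => h w (by simp [hw]))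
    simp only [List.foldl_cons, List.map_cons, hu, pvTagOf, Option.getD_some]
    by_cases hut : u = t
    · rw [if_pos hut, ih', List.count_cons, if_pos (by simp [hut])]
      push_cast; ring
    · rw [if_neg hut, ih', List.count_cons, if_neg (by simp [hut])]
      simp

-- when every key hit is already present, A's guarded increment is the plain counting insert
theorem pv_inc_eq_insert (ts : List String) (d : PySem.Dict String Int)
    (h : ∀ t ∈ ts, d.contains t = true) :
    ts.foldl
      (fun d t => match d.get? t with
        | some cnt => d.insert t (cnt + 1)
        | none => d) d
    = ts.foldl (fun d t => d.insert t (d.getD t 0 + 1)) d := by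
  induction ts generalizing d with
  | nil => rfl
  | cons t ts ih =>
    have hc : d.contains t = true := h t (by simp)
    obtain ⟨cnt, hcnt⟩ : ∃ cnt, d.get? t = some cnt := by
      rw [PySem.Dict.contains_eq_isSome_get?] at hc
      exact Option.isSome_iff_exists.mp hc
    simp only [List.foldl_cons, hcnt, PySem.Dict.getD_of_get?_eq_some d 0 hcnt]
    refine ih _ (fun t' ht' => ?_)
    rw [PySem.Dict.contains_insert]
    simp [h t' (by simp [ht'])]

-- getD through a fold of inserts whose value depends only on the key: last write wins
theorem pv_getD_foldl_insert_g (g : String → Int) (l : List String)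
    (d : PySem.Dict String Int) (t : String) (d0 : Int) :
    (l.foldl (fun d x => d.insert x (g x)) d).getD t d0
    = if t ∈ l then g t else d.getD t d0 := by
  induction l generalizing d with
  | nil => simp
  | cons x l ih =>
    simp only [List.foldl_cons, ih, List.mem_cons]
    by_cases hl : t ∈ l
    · simp [hl]
    · by_cases hx : t = x
      · simp [hx]
      · simp [hx, hl, PySem.Dict.getD_insert]

-- the index-setting loop over a list of identical start dicts is a map over the range
theorem pv_setfold {α : Type} (F : Int → α → α) (d0 d : α) :
    ∀ (n : Nat) (P : List α),
    (PySem.List.pyRange (P.length : Int) ((P.length : Int) + (n : Int))).foldl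
      (fun cl i => PySem.List.pySetD cl i (F i (PySem.List.pyGetD cl i d0)))
      (P ++ List.replicate n d)
    = P ++ (PySem.List.pyRange (P.length : Int) ((P.length : Int) + (n : Int))).map (fun i => F i d) := by
  intro n
  induction n with
  | zero =>
    intro P
    rw [Nat.cast_zero, add_zero, PySem.List.pyRange_one_eq_nil (le_refl _)]
    simp
  | succ n ih =>
    intro P
    rw [PySem.List.pyRange_one_cons (by omega)]
    simp only [List.foldl_cons, List.map_cons]
    have hget : PySem.List.pyGetD (P ++ List.replicate (n + 1) d) (P.length : Int) d0 = d := by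
      simp [PySem.List.pyGetD_natCast, List.getD, List.replicate_succ]
    have hset : PySem.List.pySetD (P ++ List.replicate (n + 1) d) (P.length : Int)
        (F (P.length : Int) (PySem.List.pyGetD (P ++ List.replicate (n + 1) d) (P.length : Int) d0))
        = (P ++ [F (P.length : Int) d]) ++ List.replicate n d := by
      rw [hget, PySem.List.pySetD_natCast]
      simp [List.replicate_succ, List.append_assoc]
    rw [hset]
    have := ih (P ++ [F (P.length : Int) d])
    have hlen : (((P ++ [F (P.length : Int) d]).length : Nat) : Int) = (P.length : Int) + 1 := by
      simp
    rw [hlen] at this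
    have harg : (P.length : Int) + 1 + (n : Int) = (P.length : Int) + ((n : Nat) + 1 : Nat) := by
      push_cast; ring
    rw [harg] at this
    rw [this, List.append_assoc, List.singleton_append]

-- A's first loop builds n copies of the zero dict
theorem pv_init_replicate {α : Type} (n : Nat) (d : α) :
    (PySem.List.pyRange 0 (n : Int)).foldl (fun cl _i => cl ++ [d]) ([] : List α)
    = List.replicate n d := by
  have h1 : (PySem.List.pyRange 0 (n : Int)).foldl (fun cl _i => cl ++ [d]) []
      = [] ++ (PySem.List.pyRange 0 (n : Int)).map (fun _ => d) :=
    PySem.List.foldl_append_singleton_eq_map (fun _ => d) _ []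
  rw [h1, List.nil_append, List.map_const', PySem.List.length_pyRange_one]
  congr 1

-- per-centroid: A's incremented zero dict equals B's tag-driven counting dict (as items lists)
theorem pv_per_centroid (tags : List String) (c : List Int)
    (h : ∀ v ∈ c, PySem.Raise.InRange tags.length v) :
    (c.foldl (pvStepA tags) (pvD0 tags)).items
    = (tags.foldl (fun d t => d.insert t (pvCountTag tags c t)) PySem.Dict.empty).items := by
  set ts := c.map (pvTagOf tags) with hts
  have hts_mem : ∀ t ∈ ts, t ∈ tags := by
    intro t ht
    rw [hts] at ht
    obtain ⟨v, hv, rfl⟩ := List.mem_map.mp ht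
    obtain ⟨x, hx⟩ := pv_exists_tag tags (h v hv)
    simp only [pvTagOf, hx, Option.getD_some]
    exact PySem.List.mem_of_pyGet?_eq_some tags hx
  have hD0keys : (pvD0 tags).keys = PySem.Set.ofList tags := by
    have h1 : (pvD0 tags).keys = PySem.Set.update PySem.Dict.empty.keys tags :=
      PySem.Dict.keys_foldl_insert tags (fun _ _ => (0 : Int)) PySem.Dict.empty
    rw [h1]
    simp [PySem.Set.update_nil_left]
  have hD0getD : ∀ t, (pvD0 tags).getD t 0 = 0 := by
    intro t
    have h1 : (pvD0 tags).getD t 0 = if t ∈ tags then (0 : Int) else PySem.Dict.empty.getD t 0 :=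
      pv_getD_foldl_insert_g (fun _ => (0 : Int)) tags PySem.Dict.empty t 0
    rw [h1]
    split <;> simp [PySem.Dict.getD_empty]
  have hD0contains : ∀ t ∈ tags, (pvD0 tags).contains t = true := by
    intro t ht
    rw [PySem.Dict.contains_eq_decide_mem_keys, hD0keys]
    simp [PySem.Set.mem_ofList, ht]
  -- A side
  rw [pv_foldA_eq_tags tags c h, ← hts,
      pv_inc_eq_insert ts (pvD0 tags) (fun t ht => hD0contains t (hts_mem t ht))]
  set dA := ts.foldl (fun d t => d.insert t (d.getD t 0 + 1)) (pvD0 tags) with hdA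
  have hdAkeys : dA.keys = PySem.Set.ofList tags := by
    have h1 : dA.keys = PySem.Set.update (pvD0 tags).keys ts :=
      PySem.Dict.keys_foldl_insert ts (fun d t => d.getD t 0 + 1) (pvD0 tags)
    rw [h1, PySem.Set.update_eq_append_filter, hD0keys]
    have h2 : (PySem.Set.ofList ts).filter (fun y => !(PySem.Set.contains (PySem.Set.ofList tags) y)) = [] := by
      rw [List.filter_eq_nil_iff]
      intro y hy
      have hmem : y ∈ tags := hts_mem y ((PySem.Set.mem_ofList ts y).mp hy)
      simp [PySem.Set.contains_eq_listContains, hmem]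
    rw [h2, List.append_nil]
  have hdAgetD : ∀ t, dA.getD t 0 = (ts.count t : Int) := by
    intro t
    rw [hdA, PySem.Dict.getD_foldl_insert_add_one, hD0getD, zero_add]
  -- B side: the per-tag scan counts the mapped tags
  set dB := tags.foldl (fun d t => d.insert t (pvCountTag tags c t)) PySem.Dict.empty with hdB
  have hdBkeys : dB.keys = PySem.Set.ofList tags := by
    have h1 : dB.keys = PySem.Set.update PySem.Dict.empty.keys tags :=
      PySem.Dict.keys_foldl_insert tags (fun _ tag => pvCountTag tags c tag) PySem.Dict.empty
    rw [h1]
    simp [PySem.Set.update_nil_left]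
  have hdBgetD : ∀ t ∈ tags, dB.getD t 0 = (ts.count t : Int) := by
    intro t ht
    have h1 : dB.getD t 0
        = if t ∈ tags then pvCountTag tags c t else PySem.Dict.empty.getD t 0 :=
      pv_getD_foldl_insert_g (fun tag => pvCountTag tags c tag) tags PySem.Dict.empty t 0
    rw [h1, if_pos ht]
    have h2 := pv_count_eq_tags tags c h t 0
    rw [zero_add] at h2
    rw [pvCountTag, h2, hts]
  have hdAnodup : dA.keys.Nodup := by rw [hdAkeys]; exact PySem.Set.nodup_ofList tags
  have hdBnodup : dB.keys.Nodup := by rw [hdBkeys]; exact PySem.Set.nodup_ofList tags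
  rw [PySem.Dict.items_eq_map_keys dA hdAnodup 0, PySem.Dict.items_eq_map_keys dB hdBnodup 0,
      hdAkeys, hdBkeys]
  apply List.map_congr_left
  intro k hk
  have hktags : k ∈ tags := (PySem.Set.mem_ofList tags k).mp hk
  rw [hdAgetD k, hdBgetD k hktags]

-- A as a map over its centroids
theorem pv_A_eq_map (centroids : List (List Int)) (tags : List String) :
    get_cluster_numbers centroids tags
    = centroids.map (fun c => (c.foldl (pvStepA tags) (pvD0 tags)).items) := by
  show (((PySem.List.pyRange 0 centroids.length).foldl
      (fun cl i =>
        PySem.List.pySetD cl i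
          ((PySem.List.pyGetD centroids i []).foldl (pvStepA tags)
            (PySem.List.pyGetD cl i PySem.Dict.empty)))
      ((PySem.List.pyRange 0 centroids.length).foldl
        (fun cl _i => cl ++ [pvD0 tags]) [])).map (·.items)) = _
  rw [pv_init_replicate centroids.length (pvD0 tags)]
  have h2 := pv_setfold (fun i d => (PySem.List.pyGetD centroids i []).foldl (pvStepA tags) d)
      PySem.Dict.empty (pvD0 tags) centroids.length []
  simp only [List.length_nil, Nat.cast_zero, zero_add, List.nil_append] at h2
  rw [h2, List.map_map]
  have h3 : ((PySem.List.pyRange 0 (centroids.length : Int)).map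
        (fun i => PySem.List.pyGetD centroids i [])).map
        (fun c => (c.foldl (pvStepA tags) (pvD0 tags)).items)
      = centroids.map (fun c => (c.foldl (pvStepA tags) (pvD0 tags)).items) := by
    rw [PySem.List.map_pyGetD_pyRange_zero' centroids ([] : List Int)]
  rw [← h3, List.map_map]
  rfl

-- ===== VERDICT (by name: the statement is the Claim_ definition above) =====
theorem get_cluster_numbers_spec : Claim_equal_get_cluster_numbers := by
  intro centroids tags _hdom hpre
  show get_cluster_numbers centroids tags = get_cluster_numbers_alt centroids tags
  rw [pv_A_eq_map]
  show _ = centroids.map _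
  apply List.map_congr_left
  intro c hc
  exact pv_per_centroid tags c (hpre c hc)
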